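-- pv_equiv track=rewrite | github.com/Elvis1327/Python | Algorithms/LeetCode/FindSubarraysWithEqualSum.py | findSubarraysTwo
-- ===== SOURCE A (Python) =====
-- def findSubarraysTwo(nums = [4,2,4]):
--     hash = {}
--     res = 0
--     for i in range(1,len(nums)):
--         res = nums[i-1] + nums[i]
--         hash[res] = hash.get(res,0) + 1
--     for j, k in hash.items():
--         if k > 1:
--             return True
--     return False
-- ===== SOURCE B (Python) =====
-- def findSubarraysTwo(nums = [4,2,4]):
--     seen = set()
--     for i in range(1, len(nums)):
--         s = nums[i-1] + nums[i]
--         if s in seen: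
--             return True
--         seen.add(s)
--     return False
-- ===== Notes on version B (the rewrite author's own statement) =====
-- stated objective: simpler
-- what changed: Replaces the two-pass build-a-count-dict-then-scan-items structure with a single pass that keeps only a set of sums seen so far and returns True at the first repeat.
import Mathlib
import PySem

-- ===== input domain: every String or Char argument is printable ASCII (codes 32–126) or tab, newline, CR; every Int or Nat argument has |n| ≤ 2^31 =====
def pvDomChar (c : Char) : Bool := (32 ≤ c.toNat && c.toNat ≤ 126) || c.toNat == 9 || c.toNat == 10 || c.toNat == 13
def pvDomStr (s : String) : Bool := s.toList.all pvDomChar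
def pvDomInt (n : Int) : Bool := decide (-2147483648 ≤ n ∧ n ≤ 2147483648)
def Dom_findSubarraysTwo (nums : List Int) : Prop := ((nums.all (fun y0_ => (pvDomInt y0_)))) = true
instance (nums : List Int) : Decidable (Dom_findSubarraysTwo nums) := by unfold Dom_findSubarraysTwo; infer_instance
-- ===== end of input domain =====

-- B replaces A's build-count-dict-then-scan with one early-exit pass over a seen-set; same return value.

-- ===== PORT A =====
-- second loop of A: 'for j, k in hash.items(): if k > 1: return True' then 'return False'
def findSubarraysTwoScanItems : List (Int × Int) → Bool
  | [] => false
  | (_, k) :: rest => if k > 1 then true else findSubarraysTwoScanItems rest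

def findSubarraysTwo (nums : List Int) : Bool :=
  let hash :=
    (PySem.List.pyRange 1 (nums.length : Int) 1).foldl
      (fun h i =>
        let res := PySem.List.pyGetD nums (i - 1) 0 + PySem.List.pyGetD nums i 0
        h.insert res (h.getD res 0 + 1))
      PySem.Dict.empty
  findSubarraysTwoScanItems hash.items

-- ===== PORT B =====
-- B's single loop: over range(1, len), early return on 's in seen', else seen.add(s)
def findSubarraysTwoAltLoop (nums : List Int) : List Int → PySem.Set Int → Bool
  | [], _ => false
  | i :: rest, seen =>
    let s := PySem.List.pyGetD nums (i - 1) 0 + PySem.List.pyGetD nums i 0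
    if PySem.Set.contains seen s then true
    else findSubarraysTwoAltLoop nums rest (PySem.Set.add seen s)

def findSubarraysTwo_alt (nums : List Int) : Bool :=
  findSubarraysTwoAltLoop nums (PySem.List.pyRange 1 (nums.length : Int) 1) PySem.Set.empty

-- ===== PRECONDITION & SPEC =====
def Spec_findSubarraysTwo (nums : List Int) (out : Bool) : Prop := out = findSubarraysTwo_alt nums
instance (nums : List Int) (out : Bool) : Decidable (Spec_findSubarraysTwo nums out) := by unfold Spec_findSubarraysTwo; infer_instance

-- ===== CLAIM (what is proved, stated in full; the proofs are below) =====
def Claim_equal_findSubarraysTwo : Prop := ∀ (nums : List Int), Dom_findSubarraysTwo nums → Spec_findSubarraysTwo nums (findSubarraysTwo nums)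

-- ===== LEMMAS AND PROOFS =====

-- the list of adjacent-pair sums both programs traverse
def pvSums (nums : List Int) : List Int :=
  (PySem.List.pyRange 1 (nums.length : Int) 1).map
    (fun i => PySem.List.pyGetD nums (i - 1) 0 + PySem.List.pyGetD nums i 0)

-- A's item scan is List.any over the second components
theorem scanItems_eq_any (l : List (Int × Int)) :
    findSubarraysTwoScanItems l = l.any (fun p => p.2 > 1) := by
  induction l with
  | nil => rfl
  | cons p rest ih =>
    cases p with
    | mk j k =>
      simp [findSubarraysTwoScanItems, List.any_cons, ih]

-- A computes: some sum occurs more than once in pvSums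
theorem findSubarraysTwo_eq_not_nodup (nums : List Int) :
    findSubarraysTwo nums = !(pvSums nums).Nodup := by
  simp only [findSubarraysTwo]
  have hfold :
      (PySem.List.pyRange 1 (nums.length : Int) 1).foldl
        (fun h i =>
          h.insert (PySem.List.pyGetD nums (i - 1) 0 + PySem.List.pyGetD nums i 0)
            (h.getD (PySem.List.pyGetD nums (i - 1) 0 + PySem.List.pyGetD nums i 0) 0 + 1))
        (PySem.Dict.empty : PySem.Dict Int Int)
      = (pvSums nums).foldl (fun d x => d.insert x (d.getD x 0 + 1)) (PySem.Dict.empty : PySem.Dict Int Int) := by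
    simp [pvSums, List.foldl_map]
  rw [hfold]
  rw [PySem.Dict.foldl_insert_getD_add_one_eq_counter, scanItems_eq_any,
      PySem.Dict.items_counter]
  simp only [List.any_map]
  by_cases h : (pvSums nums).Nodup
  · -- nodup: every count ≤ 1, so no item value exceeds 1
    simp only [h, decide_true, Bool.not_true, List.any_eq_false]
    intro x hx
    have hc := List.nodup_iff_count_le_one.mp h x
    simp
    omega
  · -- not nodup: some element has count > 1
    simp only [h, decide_false, Bool.not_false, List.any_eq_true]
    rw [List.nodup_iff_count_le_one] at h
    simp only [not_forall] at h
    obtain ⟨a, ha⟩ := h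
    have hm : a ∈ pvSums nums := List.count_pos_iff.mp (by omega)
    refine ⟨a, by simpa [PySem.Set.mem_ofList] using hm, ?_⟩
    simp
    omega

-- one step of B's loop: membership test against a duplicate-free seen-set
theorem altLoop_step (s : Int) (tail : List Int) (seen : PySem.Set Int)
    (b : Bool) (hb : b = !((PySem.Set.add seen s) ++ tail).Nodup) :
    (if PySem.Set.contains seen s = true then true else b)
      = !((seen ++ s :: tail).Nodup) := by
  by_cases hmem : s ∈ seen
  · have hc : PySem.Set.contains seen s = true := by simpa [PySem.Set.contains] using hmem
    have hnot : ¬ (seen ++ s :: tail).Nodup := by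
      intro hn
      rcases List.nodup_append.mp hn with ⟨_, _, hdisj⟩
      exact hdisj s hmem s (by simp) rfl
    rw [if_pos hc, decide_eq_false hnot]
    rfl
  · have hc : ¬ PySem.Set.contains seen s = true := by simpa [PySem.Set.contains] using hmem
    have hadd : PySem.Set.add seen s = seen ++ [s] := by
      simp only [PySem.Set.add]
      rw [if_neg hc]
    rw [if_neg hc, hb, hadd, List.append_assoc, List.singleton_append]

-- B's loop invariant: with a duplicate-free seen-set, the scan detects exactly
-- a repetition in seen ++ (sums of l)
theorem altLoop_eq_not_nodup (nums : List Int) (l : List Int) (seen : PySem.Set Int)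
    (hs : seen.Nodup) :
    findSubarraysTwoAltLoop nums l seen
      = !(seen ++ l.map (fun i => PySem.List.pyGetD nums (i - 1) 0 + PySem.List.pyGetD nums i 0)).Nodup := by
  induction l generalizing seen with
  | nil => simp [findSubarraysTwoAltLoop, hs]
  | cons i rest ih =>
    simp only [findSubarraysTwoAltLoop, List.map_cons]
    exact altLoop_step _ _ _ _ (ih _ (PySem.Set.nodup_add _ _ hs))

theorem alt_eq_not_nodup (nums : List Int) :
    findSubarraysTwo_alt nums = !(pvSums nums).Nodup := by
  unfold findSubarraysTwo_alt
  rw [altLoop_eq_not_nodup nums _ PySem.Set.empty (by exact List.nodup_nil)]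
  rfl

-- ===== VERDICT (by name: the statement is the Claim_ definition above) =====
theorem findSubarraysTwo_spec : Claim_equal_findSubarraysTwo := by
  intro nums _
  unfold Spec_findSubarraysTwo
  rw [findSubarraysTwo_eq_not_nodup, alt_eq_not_nodup]
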